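-- pv_equiv track=rewrite | github.com/aseexcellence/a2sv | 1242-matrix-block-sum/matrix-block-sum.py | matrixBlockSum
-- ===== SOURCE A (Python) =====
-- from typing import List
--
-- def matrixBlockSum(mat: List[List[int]], k: int) -> List[List[int]]:
--   m, n = len(mat), len(mat[0])
--   ans = [[0 for _ in range(n)] for _ in range(m)]
--
--   for i in range(m):
--     rowStart, rowEnd = max(0, i-k), min(m, i+k+1)
--     for j in range(n):
--       colStart, colEnd = max(0, j-k), min(n, j+k+1)
--       for l in range(rowStart, rowEnd):
--         ans[i][j] += sum(mat[l][colStart:colEnd])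
--
--   return ans
-- ===== SOURCE B (Python) =====
-- from typing import List
--
-- def matrixBlockSum(mat: List[List[int]], k: int) -> List[List[int]]:
--     m, n = len(mat), len(mat[0])
--     # integral image: P[i][j] = sum of mat[0:i][0:j]
--     P = [[0] * (n + 1) for _ in range(m + 1)]
--     for i in range(m):
--         Pi, Pi1, row = P[i], P[i + 1], mat[i]
--         for j in range(n):
--             Pi1[j + 1] = row[j] + Pi[j + 1] + Pi1[j] - Pi[j]
--     res = []
--     for i in range(m):
--         r2 = max(0, min(m, i + k + 1))
--         r1 = min(max(0, i - k), r2)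
--         out_row = []
--         for j in range(n):
--             c2 = max(0, min(n, j + k + 1))
--             c1 = min(max(0, j - k), c2)
--             out_row.append(P[r2][c2] - P[r1][c2] - P[r2][c1] + P[r1][c1])
--         res.append(out_row)
--     return res
-- ===== Notes on version B (the rewrite author's own statement) =====
-- stated objective: faster
-- what changed: Replaced the per-cell re-summation of row slices (O(k) rows times O(k) columns per cell) by a 2D prefix-sum (integral image) built once, so each output cell is four table lookups.
-- outside the precondition, e.g. on matrixBlockSum([[1, 2], [3]], 1): A returns [[6, 6], [6, 6]], B raises IndexError; on matrixBlockSum([], 1): A raises IndexError, B raises IndexError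
import Mathlib
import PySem

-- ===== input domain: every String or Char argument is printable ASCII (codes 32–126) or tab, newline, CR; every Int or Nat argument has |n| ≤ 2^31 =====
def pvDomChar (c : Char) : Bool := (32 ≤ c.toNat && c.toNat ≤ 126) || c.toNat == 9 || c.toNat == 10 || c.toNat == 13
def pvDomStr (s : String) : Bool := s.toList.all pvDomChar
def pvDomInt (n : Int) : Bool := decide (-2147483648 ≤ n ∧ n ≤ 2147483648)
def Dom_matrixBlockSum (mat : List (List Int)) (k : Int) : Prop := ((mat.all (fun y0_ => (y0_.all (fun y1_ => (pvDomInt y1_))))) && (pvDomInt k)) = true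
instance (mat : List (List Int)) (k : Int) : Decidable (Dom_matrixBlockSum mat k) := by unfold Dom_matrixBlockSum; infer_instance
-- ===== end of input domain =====

-- B builds a 2D prefix-sum table once and answers each cell with four lookups instead of A's per-cell slice re-summation (measured faster).
-- Pre_ restricts to nonempty rectangular-enough matrices: A raises on [], and on a row shorter than the first row A silently sums truncated slices while B raises.


-- ===== PORT A =====
def matrixBlockSum (mat : List (List Int)) (k : Int) : List (List Int) :=
  let m : Int := mat.length
  let n : Int := (mat.headD []).length
  (PySem.List.pyRange 0 m 1).map (fun i =>
    let rowStart := max 0 (i - k)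
    let rowEnd := min m (i + k + 1)
    (PySem.List.pyRange 0 n 1).map (fun j =>
      let colStart := max 0 (j - k)
      let colEnd := min n (j + k + 1)
      (PySem.List.pyRange rowStart rowEnd 1).foldl
        (fun acc l =>
          acc + (PySem.List.slice (PySem.List.pyGetD mat l []) (some colStart) (some colEnd)).sum) 0))

-- ===== PORT B =====
-- inner loop of the prefix-table construction: Pi1[j+1] = row[j] + Pi[j+1] + Pi1[j] - Pi[j]
def pvPrefRowGo (acc : Int) : List (Int × Int × Int) → List Int
  | [] => []
  | (x, p, p') :: rest => (x + p' + acc - p) :: pvPrefRowGo (x + p' + acc - p) rest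

def pvPrefRow (prev row : List Int) : List Int :=
  0 :: pvPrefRowGo 0 (row.zip (prev.zip prev.tail))

def pvBuildP (prev : List Int) : List (List Int) → List (List Int)
  | [] => [prev]
  | r :: rest => prev :: pvBuildP (pvPrefRow prev r) rest

def matrixBlockSum_alt (mat : List (List Int)) (k : Int) : List (List Int) :=
  let m : Int := mat.length
  let n : Int := (mat.headD []).length
  let P := pvBuildP (List.replicate ((mat.headD []).length + 1) 0) mat
  let g := fun (a b : Int) => PySem.List.pyGetD (PySem.List.pyGetD P a []) b 0
  (PySem.List.pyRange 0 m 1).map (fun i =>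
    let r2 := max 0 (min m (i + k + 1))
    let r1 := min (max 0 (i - k)) r2
    (PySem.List.pyRange 0 n 1).map (fun j =>
      let c2 := max 0 (min n (j + k + 1))
      let c1 := min (max 0 (j - k)) c2
      g r2 c2 - g r1 c2 - g r2 c1 + g r1 c1))

-- ===== PRECONDITION & SPEC =====
-- Pre_ excludes the empty matrix, on which A raises IndexError at mat[0], and ragged matrices with a row
-- shorter than the first row, on which A silently sums truncated slices while B's rectangular prefix
-- table raises IndexError (the function's natural domain is a rectangular matrix).
def Pre_matrixBlockSum (mat : List (List Int)) (k : Int) : Prop :=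
  mat ≠ [] ∧ ∀ r ∈ mat, (mat.headD []).length ≤ r.length
instance (mat : List (List Int)) (k : Int) : Decidable (Pre_matrixBlockSum mat k) := by
  unfold Pre_matrixBlockSum; infer_instance

def pvWitness_matrixBlockSum : List (List Int) × Int := ([[1, 2], [3, 4]], 1)

def Spec_matrixBlockSum (mat : List (List Int)) (k : Int) (out : List (List Int)) : Prop := out = matrixBlockSum_alt mat k
instance (mat : List (List Int)) (k : Int) (out : List (List Int)) : Decidable (Spec_matrixBlockSum mat k out) := by unfold Spec_matrixBlockSum; infer_instance

-- ===== CLAIM (what is proved, stated in full; the proofs are below) =====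
def Claim_equal_matrixBlockSum : Prop := ∀ (mat : List (List Int)) (k : Int), Dom_matrixBlockSum mat k → Pre_matrixBlockSum mat k → Spec_matrixBlockSum mat k (matrixBlockSum mat k)

-- ===== LEMMAS AND PROOFS =====

-- model: pvS rows i j = sum of the first i rows restricted to their first j columns
def pvS (rows : List (List Int)) (i j : Nat) : Int :=
  ((rows.take i).map (fun r => (r.take j).sum)).sum

lemma pv_sum_map_sub {α : Type} (l : List α) (f g : α → Int) :
    (l.map (fun x => f x - g x)).sum = (l.map f).sum - (l.map g).sum := by
  induction l with
  | nil => simp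
  | cons x t ih => simp [ih]; ring

lemma pv_take_sum_sub (xs : List Int) (a b : Nat) (hab : a ≤ b) :
    ((xs.drop a).take (b - a)).sum = (xs.take b).sum - (xs.take a).sum := by
  rw [show b = a + (b - a) by omega, List.take_add]
  simp

lemma pvS_sub (rows : List (List Int)) (a b j : Nat) (hab : a ≤ b) :
    pvS rows b j - pvS rows a j = (((rows.drop a).take (b - a)).map (fun r => (r.take j).sum)).sum := by
  unfold pvS
  rw [show b = a + (b - a) by omega, List.take_add]
  simp

lemma pv_cell (rows : List (List Int)) (a b c1 c2 : Nat) (hab : a ≤ b) (hc : c1 ≤ c2) :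
    (((rows.drop a).take (b - a)).map (fun r => ((r.drop c1).take (c2 - c1)).sum)).sum
      = pvS rows b c2 - pvS rows a c2 - (pvS rows b c1 - pvS rows a c1) := by
  rw [pvS_sub rows a b c2 hab, pvS_sub rows a b c1 hab, ← pv_sum_map_sub]
  congr 1
  apply List.map_congr_left
  intro r _
  exact pv_take_sum_sub r c1 c2 hc

lemma pv_zip_take {α β : Type} : ∀ (l : List α) (ps : List β), l.zip ps = (l.take ps.length).zip ps := by
  intro l
  induction l with
  | nil => intro ps; simp
  | cons x t ih =>
    intro ps
    cases ps with
    | nil => simp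
    | cons y u =>
      simp only [List.length_cons, List.take_succ_cons, List.zip_cons_cons]
      rw [← ih u]

lemma pv_go_eq (row : List Int) : ∀ (prev : List Int) (acc : Int),
    row.length + 1 = prev.length →
    pvPrefRowGo acc (row.zip (prev.zip prev.tail)) =
      (List.range row.length).map
        (fun j => acc - prev.getD 0 0 + prev.getD (j + 1) 0 + (row.take (j + 1)).sum) := by
  induction row with
  | nil => intro prev acc h; simp [pvPrefRowGo]
  | cons x row' ih =>
    intro prev acc h
    match prev with
    | p :: p' :: rest =>
      simp only [List.tail_cons, List.zip_cons_cons, pvPrefRowGo]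
      have hih := ih (p' :: rest) (x + p' + acc - p) (by simpa using h)
      simp only [List.tail_cons] at hih
      rw [hih, show (x :: row').length = row'.length + 1 from rfl, List.range_succ_eq_map]
      simp [List.map_map, Function.comp]
      constructor
      · ring
      · intro j hj
        ring

lemma pv_prefRow_eq (f : Nat → Int) (n : Nat) (r : List Int) (hr : n ≤ r.length) (hf0 : f 0 = 0) :
    pvPrefRow ((List.range (n + 1)).map f) r =
      (List.range (n + 1)).map (fun j => f j + (r.take j).sum) := by
  have hlen : ((((List.range (n + 1)).map f)).zip (((List.range (n + 1)).map f)).tail).length = n := by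
    simp
  unfold pvPrefRow
  rw [pv_zip_take r _, hlen,
    pv_go_eq (r.take n) _ 0 (by simp only [List.length_take, List.length_map, List.length_range]; omega)]
  have hrn : (r.take n).length = n := by simp only [List.length_take]; omega
  have hR : (List.range (n + 1)).map (fun j => f j + (r.take j).sum)
      = (f 0 + ((r.take 0).sum)) :: (List.range n).map (fun j => f (j + 1) + (r.take (j + 1)).sum) := by
    rw [List.range_succ_eq_map (n := n)]
    simp [List.map_map, Function.comp]
  rw [hR, hrn]
  congr 1
  · simp [hf0]
  · apply List.map_congr_left
    intro j hj
    have hj' : j < n := List.mem_range.mp hj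
    have h1 : ((List.range (n + 1)).map f).getD 0 0 = f 0 := by
      simp [List.getD_eq_getElem?_getD]
    have h2 : ((List.range (n + 1)).map f).getD (j + 1) 0 = f (j + 1) := by
      simp [List.getD_eq_getElem?_getD, Nat.succ_lt_succ hj']
    have h3 : (r.take n).take (j + 1) = r.take (j + 1) := by
      rw [List.take_take]; congr 1; omega
    rw [h1, h2, h3, hf0]
    ring

lemma pv_buildP_eq (n : Nat) : ∀ (rows : List (List Int)) (f : Nat → Int), f 0 = 0 →
    (∀ r ∈ rows, n ≤ r.length) →
    pvBuildP ((List.range (n + 1)).map f) rows =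
      (List.range (rows.length + 1)).map
        (fun i => (List.range (n + 1)).map (fun j => f j + pvS rows i j)) := by
  intro rows
  induction rows with
  | nil => intro f hf0 _; simp [pvBuildP, pvS, List.range_one]
  | cons r rest ih =>
    intro f hf0 hlen
    simp only [pvBuildP]
    rw [pv_prefRow_eq f n r (hlen r (by simp)) hf0]
    rw [ih (fun j => f j + (r.take j).sum) (by simp [hf0]) (fun r' hr' => hlen r' (by simp [hr']))]
    have hR : (List.range ((r :: rest).length + 1)).map
          (fun i => (List.range (n + 1)).map (fun j => f j + pvS (r :: rest) i j))
        = ((List.range (n + 1)).map (fun j => f j + pvS (r :: rest) 0 j))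
          :: (List.range (rest.length + 1)).map
              (fun i => (List.range (n + 1)).map (fun j => f j + pvS (r :: rest) (i + 1) j)) := by
      rw [show (r :: rest).length + 1 = (rest.length + 1) + 1 from rfl,
        List.range_succ_eq_map (n := rest.length + 1)]
      simp [List.map_map, Function.comp]
    rw [hR]
    congr 1
    · simp [pvS]
    · apply List.map_congr_left
      intro i _
      apply List.map_congr_left
      intro j _
      have hS : pvS (r :: rest) (i + 1) j = (r.take j).sum + pvS rest i j := by
        simp [pvS]
      rw [hS]
      ring

lemma pv_fold_eq (rows : List (List Int)) (a b : Int) (F : List Int → Int)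
    (h0 : 0 ≤ a) (hab : a ≤ b) (hb : b ≤ (rows.length : Int)) :
    (PySem.List.pyRange a b 1).map (fun l => F (PySem.List.pyGetD rows l [])) =
      ((rows.drop a.toNat).take (b.toNat - a.toNat)).map F := by
  apply List.ext_getElem
  · simp only [List.length_map, PySem.List.length_pyRange_one, List.length_take, List.length_drop]
    omega
  · intro t h1 h2
    have hlt : t < (b - a).toNat := by
      simpa [PySem.List.length_pyRange_one] using h1
    simp only [List.getElem_map, List.getElem_take, List.getElem_drop]
    rw [PySem.List.getElem_pyRange_one]
    congr 1
    rw [PySem.List.pyGetD_eq_getElem rows [] (by omega) (by omega)]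
    simp only [show (a + (t : Int)).toNat = a.toNat + t by omega]

lemma pv_getD_PS (rows : List (List Int)) (n : Nat) (a b : Int)
    (h0a : 0 ≤ a) (ham : a ≤ (rows.length : Int)) (h0b : 0 ≤ b) (hbn : b ≤ (n : Int)) :
    PySem.List.pyGetD (PySem.List.pyGetD ((List.range (rows.length + 1)).map
        (fun i => (List.range (n + 1)).map (fun j => pvS rows i j))) a []) b 0
      = pvS rows a.toNat b.toNat := by
  rw [PySem.List.pyGetD_eq_getElem _ [] h0a (by simp only [List.length_map, List.length_range]; push_cast; omega)]
  simp only [List.getElem_map, List.getElem_range]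
  rw [PySem.List.pyGetD_eq_getElem _ 0 h0b (by simp only [List.length_map, List.length_range]; push_cast; omega)]
  simp only [List.getElem_map, List.getElem_range]

-- ===== VERDICT (by name: the statement is the Claim_ definition above) =====
theorem matrixBlockSum_spec : Claim_equal_matrixBlockSum := by
  intro mat k _dom hpre
  obtain ⟨hne, hlen⟩ := hpre
  unfold Spec_matrixBlockSum
  simp only [matrixBlockSum, matrixBlockSum_alt]
  have hrepl : (List.replicate ((mat.headD []).length + 1) (0 : Int))
      = (List.range ((mat.headD []).length + 1)).map (fun _ => (0 : Int)) := by
    simp [List.map_const']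
  have hP : pvBuildP (List.replicate ((mat.headD []).length + 1) 0) mat
      = (List.range (mat.length + 1)).map
          (fun i => (List.range ((mat.headD []).length + 1)).map (fun j => pvS mat i j)) := by
    rw [hrepl, pv_buildP_eq ((mat.headD []).length) mat (fun _ => 0) rfl hlen]
    simp
  rw [hP]
  apply List.map_congr_left
  intro i hi
  rw [PySem.List.mem_pyRange_one] at hi
  apply List.map_congr_left
  intro j hj
  rw [PySem.List.mem_pyRange_one] at hj
  rw [PySem.List.foldl_add]
  by_cases hre : min ((mat.length : Int)) (i + k + 1) ≤ max 0 (i - k)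
  · rw [PySem.List.pyRange_one_eq_nil hre]
    have h12 : min (max 0 (i - k)) (max 0 (min ((mat.length : Int)) (i + k + 1)))
        = max 0 (min ((mat.length : Int)) (i + k + 1)) := by omega
    rw [h12]
    simp only [List.map_nil, List.sum_nil, add_zero]
    ring
  · rw [not_le] at hre
    have hk : 0 ≤ k := by omega
    have hr2 : max 0 (min ((mat.length : Int)) (i + k + 1)) = min ((mat.length : Int)) (i + k + 1) := by
      omega
    rw [hr2]
    have hr1 : min (max 0 (i - k)) (min ((mat.length : Int)) (i + k + 1)) = max 0 (i - k) := by omega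
    rw [hr1]
    have hc2 : max 0 (min (((mat.headD []).length : Int)) (j + k + 1))
        = min (((mat.headD []).length : Int)) (j + k + 1) := by omega
    rw [hc2]
    have hc1 : min (max 0 (j - k)) (min (((mat.headD []).length : Int)) (j + k + 1)) = max 0 (j - k) := by
      omega
    rw [hc1]
    have hfold := pv_fold_eq mat (max 0 (i - k)) (min ((mat.length : Int)) (i + k + 1))
        (fun r => (PySem.List.slice r (some (max 0 (j - k)))
          (some (min (((mat.headD []).length : Int)) (j + k + 1)))).sum)
        (le_max_left 0 _) (le_of_lt hre) (min_le_left _ _)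
    simp only at hfold
    rw [hfold]
    have hslice : ∀ r ∈ (mat.drop (max 0 (i - k)).toNat).take
          ((min ((mat.length : Int)) (i + k + 1)).toNat - (max 0 (i - k)).toNat),
        (PySem.List.slice r (some (max 0 (j - k)))
            (some (min (((mat.headD []).length : Int)) (j + k + 1)))).sum
          = ((r.drop (max 0 (j - k)).toNat).take
              ((min (((mat.headD []).length : Int)) (j + k + 1)).toNat - (max 0 (j - k)).toNat)).sum := by
      intro r _
      rw [PySem.List.slice_toNat r (le_max_left 0 _) (by omega)]
    rw [List.map_congr_left hslice]
    rw [pv_cell mat _ _ _ _ (by omega) (by omega)]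
    rw [pv_getD_PS mat ((mat.headD []).length) _ _ (by omega) (min_le_left _ _) (by omega) (min_le_left _ _)]
    rw [pv_getD_PS mat ((mat.headD []).length) _ _ (le_max_left 0 _) (by omega) (by omega) (min_le_left _ _)]
    rw [pv_getD_PS mat ((mat.headD []).length) _ _ (by omega) (min_le_left _ _) (le_max_left 0 _) (by omega)]
    rw [pv_getD_PS mat ((mat.headD []).length) _ _ (le_max_left 0 _) (by omega) (le_max_left 0 _) (by omega)]
    ring
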